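-- pv_equiv track=rewrite | github.com/RodrigoInosh/CalculoPredictivo | ConvierteTablaAFeatureClassPunto.py | posicionCampoCoordenadas
-- ===== SOURCE A (Python) =====
-- def posicionCampoCoordenadas(lista):
--     pLat = -1
--     pLon = -1
--     for p in range(0,len(lista)):
--         if lista[p] == "LAT_PTX":
--             pLat = p
--         if lista[p] == "LONG_PTX":
--             pLon = p
--     return [pLat,pLon]
-- ===== SOURCE B (Python) =====
-- def _ultima_posicion(lista, nombre):
--     if nombre in lista:
--         return len(lista) - 1 - lista[::-1].index(nombre)
--     return -1
--
-- def posicionCampoCoordenadas(lista):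
--     return [_ultima_posicion(lista, "LAT_PTX"), _ultima_posicion(lista, "LONG_PTX")]
-- ===== Notes on version B (the rewrite author's own statement) =====
-- stated objective: idiomatic
-- what changed: Replaces the single stateful index sweep holding two accumulators with two independent end-anchored lookups: a helper returns len(lista)-1-lista[::-1].index(name) when the name is present, else -1.
import Mathlib
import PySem

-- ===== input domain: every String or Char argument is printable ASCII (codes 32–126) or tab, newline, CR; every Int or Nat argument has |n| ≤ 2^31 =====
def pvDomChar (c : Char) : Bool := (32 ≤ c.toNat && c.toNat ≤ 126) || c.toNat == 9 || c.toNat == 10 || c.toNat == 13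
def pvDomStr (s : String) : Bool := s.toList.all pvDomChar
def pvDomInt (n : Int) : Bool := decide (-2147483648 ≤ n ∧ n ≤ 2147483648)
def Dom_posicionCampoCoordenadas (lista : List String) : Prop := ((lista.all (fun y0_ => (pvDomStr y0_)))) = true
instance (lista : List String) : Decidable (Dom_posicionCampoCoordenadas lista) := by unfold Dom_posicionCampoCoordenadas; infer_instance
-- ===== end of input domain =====

-- B replaces A's single stateful index sweep by two independent end-anchored lookups (idiomatic).

-- ===== PORT A =====
-- one for-loop over range(0, len(lista)) carrying the pair (pLat, pLon)
def posicionCampoCoordenadas (lista : List String) : List Int :=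
  let st := (PySem.List.pyRange 0 (lista.length : Int) 1).foldl
    (fun (s : Int × Int) p =>
      let s1 := if PySem.List.pyGetD lista p "" == "LAT_PTX" then (p, s.2) else s
      if PySem.List.pyGetD lista p "" == "LONG_PTX" then (s1.1, p) else s1)
    ((-1 : Int), (-1 : Int))
  [st.1, st.2]

-- ===== PORT B =====
-- helper: last index of name, via a reversed search, or -1 if absent
def ultimaPosicion (lista : List String) (nombre : String) : Int :=
  if nombre ∈ lista then
    (lista.length : Int) - 1 - (((PySem.List.index? lista.reverse nombre).getD 0 : Nat) : Int)
  else -1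

def posicionCampoCoordenadas_alt (lista : List String) : List Int :=
  [ultimaPosicion lista "LAT_PTX", ultimaPosicion lista "LONG_PTX"]

-- ===== PRECONDITION & SPEC =====
def Spec_posicionCampoCoordenadas (lista : List String) (out : List Int) : Prop := out = posicionCampoCoordenadas_alt lista
instance (lista : List String) (out : List Int) : Decidable (Spec_posicionCampoCoordenadas lista out) := by unfold Spec_posicionCampoCoordenadas; infer_instance

-- ===== CLAIM (what is proved, stated in full; the proofs are below) =====
def Claim_equal_posicionCampoCoordenadas : Prop := ∀ (lista : List String), Dom_posicionCampoCoordenadas lista → Spec_posicionCampoCoordenadas lista (posicionCampoCoordenadas lista)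

-- ===== LEMMAS AND PROOFS =====


-- the last-match loop over an enumeration computes the reversed-search index
theorem fold_lastIdx (v : String) (l : List String) (s0 a : Int) :
    (PySem.List.enumerate l s0).foldl (fun acc (e : Int × String) => if e.2 == v then e.1 else acc) a
    = match PySem.List.index? l.reverse v with
      | some k => s0 + ((l.length : Int) - 1 - k)
      | none => a := by
  induction l generalizing s0 a with
  | nil => simp [PySem.List.enumerate_nil, PySem.List.index?_eq_idxOf?]
  | cons x t ih =>
    rw [PySem.List.enumerate_cons, List.foldl_cons, ih]
    by_cases hmem : v ∈ t
    · have hm' : v ∈ t.reverse := List.mem_reverse.mpr hmem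
      obtain ⟨k, hk⟩ := Option.isSome_iff_exists.mp
        ((PySem.List.index?_isSome_iff t.reverse v).mpr hm')
      rw [show (x :: t).reverse = t.reverse ++ [x] from by simp,
          PySem.List.index?_append_of_mem [x] hm', hk]
      simp only [List.length_cons]
      push_cast
      ring
    · have hnone : PySem.List.index? t.reverse v = none :=
        (PySem.List.index?_eq_none_iff t.reverse v).mpr (by simpa using hmem)
      rw [hnone]
      by_cases hx : x = v
      · subst hx
        rw [show (x :: t).reverse = t.reverse ++ [x] from by simp,
            PySem.List.index?_append_singleton_self t.reverse x (by simpa using hmem)]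
        simp
      · have : PySem.List.index? (x :: t).reverse v = none :=
          (PySem.List.index?_eq_none_iff _ v).mpr (by simp [hmem, Ne.symm hx])
        rw [this]
        simp [hx]

theorem ultimaPosicion_eq (v : String) (l : List String) :
    ultimaPosicion l v
    = match PySem.List.index? l.reverse v with
      | some k => (l.length : Int) - 1 - k
      | none => -1 := by
  unfold ultimaPosicion
  rcases h : PySem.List.index? l.reverse v with _ | k
  · have hnm : v ∉ l := by
      have := (PySem.List.index?_eq_none_iff l.reverse v).mp h
      simpa using this
    simp [hnm]
  · have hm : v ∈ l := by
      have := (PySem.List.index?_isSome_iff l.reverse v).mp (by rw [h]; rfl)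
      simpa using this
    simp [hm]

-- ===== VERDICT (by name: the statement is the Claim_ definition above) =====
theorem posicionCampoCoordenadas_spec : Claim_equal_posicionCampoCoordenadas := by
  intro lista _
  unfold Spec_posicionCampoCoordenadas posicionCampoCoordenadas posicionCampoCoordenadas_alt
  have h1 : (PySem.List.pyRange 0 (lista.length : Int) 1).foldl
      (fun (s : Int × Int) p =>
        let s1 := if PySem.List.pyGetD lista p "" == "LAT_PTX" then (p, s.2) else s
        if PySem.List.pyGetD lista p "" == "LONG_PTX" then (s1.1, p) else s1)
      ((-1 : Int), (-1 : Int))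
      = (PySem.List.enumerate lista 0).foldl
        (fun (s : Int × Int) (e : Int × String) =>
          (if e.2 == "LAT_PTX" then e.1 else s.1, if e.2 == "LONG_PTX" then e.1 else s.2))
        ((-1 : Int), (-1 : Int)) := by
    rw [PySem.List.enumerate_eq_map_pyRange lista "", List.foldl_map]
    simp only [PySem.List.len_eq]
    refine PySem.List.foldl_congr_mem _ _ _ _ ?_
    intro acc x _
    by_cases hLat : PySem.List.pyGetD lista x "" = "LAT_PTX" <;>
      by_cases hLon : PySem.List.pyGetD lista x "" = "LONG_PTX" <;>
        simp_all
  rw [h1, PySem.List.foldl_prod_mk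
        (f := fun (acc : Int) (e : Int × String) => if e.2 == "LAT_PTX" then e.1 else acc)
        (g := fun (acc : Int) (e : Int × String) => if e.2 == "LONG_PTX" then e.1 else acc),
      fold_lastIdx, fold_lastIdx, ultimaPosicion_eq, ultimaPosicion_eq]
  cases hL : PySem.List.index? lista.reverse "LAT_PTX" <;>
    cases hM : PySem.List.index? lista.reverse "LONG_PTX" <;> simp
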